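-- pv_equiv track=rewrite | github.com/AleksandraYanum/Stepik_Python_Advanced | 4_Lists/4_4_Matrix_Part_1/7_Quater_sum.py | get_right_quarter_sum
-- ===== SOURCE A (Python) =====
-- def get_right_quarter_sum(matrix, size):
--     total = 0
--
--     for row in range(1, size // 2 + size % 2):
--         for col in range(size - row, size):
--             total += matrix[row][col]
--         start = row + 2
--
--     for row in range(size // 2 + size % 2, size - 1):
--         for col in range(start, size):
--             total += matrix[row][col]
--         start += 1
--
--     return total
-- ===== SOURCE B (Python) =====
-- def get_right_quarter_sum(matrix, size):
--     total = 0
--     for col in range(size):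
--         for row in range(size - col, col):
--             total += matrix[row][col]
--     return total
-- ===== Notes on version B (the rewrite author's own statement) =====
-- stated objective: alternative
-- what changed: Traverses the region column-major instead of row-major: for each column col it sums rows in range(size-col, col) (the band between the two diagonals), eliminating A's two-phase row split and the threaded `start` accumulator; equivalence needs a sum-commutation argument.
import Mathlib
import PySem

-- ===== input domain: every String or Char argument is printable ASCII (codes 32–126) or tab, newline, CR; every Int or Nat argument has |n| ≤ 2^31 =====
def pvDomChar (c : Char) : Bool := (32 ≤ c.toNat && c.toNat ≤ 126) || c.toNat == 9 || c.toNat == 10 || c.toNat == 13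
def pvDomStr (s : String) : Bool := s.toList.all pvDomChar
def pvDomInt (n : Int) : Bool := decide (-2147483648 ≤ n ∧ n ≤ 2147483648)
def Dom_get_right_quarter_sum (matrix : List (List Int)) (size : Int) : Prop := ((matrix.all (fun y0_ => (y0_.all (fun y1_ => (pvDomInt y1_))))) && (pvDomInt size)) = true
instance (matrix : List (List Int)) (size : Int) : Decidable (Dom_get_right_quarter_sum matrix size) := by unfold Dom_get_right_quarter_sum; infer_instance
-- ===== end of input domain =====

-- B traverses the quarter region column-major (for each column, rows range(size-col, col))
-- instead of A's two-phase row-major loops with a threaded `start` accumulator (objective: alternative).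


-- ===== PORT A =====
-- matrix[row][col] is ported with pyGetD; Pre_ below admits exactly the inputs on which every
-- access is in range (so the default is never reached).  Python's `start` is unbound before the
-- first loop; the port seeds the pair with 0, which is unobservable because the second loop body
-- only runs (mid < size - 1) after the first loop has assigned `start`.
def get_right_quarter_sum (matrix : List (List Int)) (size : Int) : Int :=
  ((PySem.List.pyRange (PySem.Int.floordiv size 2 + PySem.Int.mod size 2) (size - 1) 1).foldl
    (fun (st : Int × Int) row =>
      ((PySem.List.pyRange st.2 size 1).foldl
        (fun t col => t + PySem.List.pyGetD (PySem.List.pyGetD matrix row []) col 0) st.1,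
       st.2 + 1))
    ((PySem.List.pyRange 1 (PySem.Int.floordiv size 2 + PySem.Int.mod size 2) 1).foldl
      (fun (st : Int × Int) row =>
        ((PySem.List.pyRange (size - row) size 1).foldl
          (fun t col => t + PySem.List.pyGetD (PySem.List.pyGetD matrix row []) col 0) st.1,
         row + 2)) (0, 0))).1

-- ===== PORT B =====
-- column-major: for each column, the rows of the band size-col ≤ row < col
def get_right_quarter_sum_alt (matrix : List (List Int)) (size : Int) : Int :=
  (PySem.List.pyRange 0 size 1).foldl
    (fun total col =>
      (PySem.List.pyRange (size - col) col 1).foldl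
        (fun t row => t + PySem.List.pyGetD (PySem.List.pyGetD matrix row []) col 0) total) 0

-- ===== PRECONDITION & SPEC =====
-- Pre_ admits exactly the inputs on which Python A returns: A only indexes rows 1..size-2,
-- each up to column size-1, and raises IndexError elsewhere.
def Pre_get_right_quarter_sum (matrix : List (List Int)) (size : Int) : Prop :=
  (3 ≤ size → size - 1 ≤ (matrix.length : Int)) ∧
  ∀ i ∈ List.range matrix.length, 1 ≤ i → (i : Int) + 2 ≤ size →
    size ≤ ((matrix.getD i []).length : Int)
instance (matrix : List (List Int)) (size : Int) : Decidable (Pre_get_right_quarter_sum matrix size) := by unfold Pre_get_right_quarter_sum; infer_instance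
def pvWitness_get_right_quarter_sum : List (List Int) × Int := ([[1,2,3],[4,5,6],[7,8,9]], 3)
def Spec_get_right_quarter_sum (matrix : List (List Int)) (size : Int) (out : Int) : Prop := out = get_right_quarter_sum_alt matrix size
instance (matrix : List (List Int)) (size : Int) (out : Int) : Decidable (Spec_get_right_quarter_sum matrix size out) := by unfold Spec_get_right_quarter_sum; infer_instance

-- ===== CLAIM (what is proved, stated in full; the proofs are below) =====
def Claim_equal_get_right_quarter_sum : Prop := ∀ (matrix : List (List Int)) (size : Int), Dom_get_right_quarter_sum matrix size → Pre_get_right_quarter_sum matrix size → Spec_get_right_quarter_sum matrix size (get_right_quarter_sum matrix size)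

-- ===== LEMMAS AND PROOFS =====

-- the cell both ports read
def pvF (matrix : List (List Int)) (row col : Int) : Int :=
  PySem.List.pyGetD (PySem.List.pyGetD matrix row []) col 0

-- the row sum A computes: Σ_{col = lo}^{size-1} matrix[row][col]
def pvRowSum (matrix : List (List Int)) (size row lo : Int) : Int :=
  ((PySem.List.pyRange lo size 1).map (fun col => pvF matrix row col)).sum

theorem pvFoldlAdd (f : Int → Int) (l : List Int) (t : Int) :
    l.foldl (fun a x => a + f x) t = t + (l.map f).sum := by
  induction l generalizing t with
  | nil => simp
  | cons x xs ih => rw [List.foldl_cons, ih (t + f x)]; simp; ring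

theorem pvRowSum_empty (matrix : List (List Int)) (size row lo : Int) (h : size ≤ lo) :
    pvRowSum matrix size row lo = 0 := by
  unfold pvRowSum; rw [PySem.List.pyRange_one_eq_nil h]; simp

theorem pvMidFacts (size : Int) :
    2 * PySem.Int.floordiv size 2 + PySem.Int.mod size 2 = size ∧
    0 ≤ PySem.Int.mod size 2 ∧ PySem.Int.mod size 2 < 2 := by
  have h1 := PySem.Int.floordiv_mul_add_mod size 2
  have h2 := PySem.Int.mod_nonneg size (b := 2) (by omega)
  have h3 := PySem.Int.mod_lt size (b := 2) (by omega)
  exact ⟨by linarith, h2, h3⟩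

-- phase 1 of A: the total ignores the threaded second component
theorem pvPhase1 (matrix : List (List Int)) (size : Int) (l : List Int) (t s : Int) :
    (l.foldl
      (fun (st : Int × Int) row =>
        ((PySem.List.pyRange (size - row) size 1).foldl
          (fun t col => t + PySem.List.pyGetD (PySem.List.pyGetD matrix row []) col 0) st.1,
         row + 2)) (t, s)).1
    = t + (l.map (fun row => pvRowSum matrix size row (size - row))).sum := by
  induction l generalizing t s with
  | nil => simp
  | cons x xs ih =>
      rw [List.foldl_cons, List.map_cons, List.sum_cons]
      rw [ih, pvFoldlAdd]
      unfold pvRowSum pvF; ring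

-- phase 1 of A: the final `start` is lastRow + 2 = b + 1 when the range is nonempty
theorem pvPhase1Start (matrix : List (List Int)) (size : Int) :
    ∀ (n : Nat) (a b t s : Int), (b - a).toNat = n → a < b →
    ((PySem.List.pyRange a b 1).foldl
      (fun (st : Int × Int) row =>
        ((PySem.List.pyRange (size - row) size 1).foldl
          (fun t col => t + PySem.List.pyGetD (PySem.List.pyGetD matrix row []) col 0) st.1,
         row + 2)) (t, s)).2 = b + 1 := by
  intro n
  induction n with
  | zero => intro a b t s hn hab; omega
  | succ m ih =>
      intro a b t s hn hab
      rw [PySem.List.pyRange_one_cons hab, List.foldl_cons]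
      by_cases h2 : a + 1 < b
      · exact ih (a + 1) b _ _ (by omega) h2
      · rw [PySem.List.pyRange_one_eq_nil (show b ≤ a + 1 by omega), List.foldl_nil]
        show a + 2 = b + 1
        omega

-- phase 2 of A: with the invariant start = row + 1
theorem pvPhase2 (matrix : List (List Int)) (size : Int) :
    ∀ (n : Nat) (a t : Int), (size - 1 - a).toNat = n →
    ((PySem.List.pyRange a (size - 1) 1).foldl
      (fun (st : Int × Int) row =>
        ((PySem.List.pyRange st.2 size 1).foldl
          (fun t col => t + PySem.List.pyGetD (PySem.List.pyGetD matrix row []) col 0) st.1,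
         st.2 + 1)) (t, a + 1)).1
    = t + ((PySem.List.pyRange a (size - 1) 1).map
        (fun row => pvRowSum matrix size row (row + 1))).sum := by
  intro n
  induction n with
  | zero =>
      intro a t hn
      rw [PySem.List.pyRange_one_eq_nil (show size - 1 ≤ a by omega)]
      simp
  | succ m ih =>
      intro a t hn
      have hab : a < size - 1 := by omega
      rw [PySem.List.pyRange_one_cons hab, List.foldl_cons, List.map_cons, List.sum_cons]
      show ((PySem.List.pyRange (a + 1) (size - 1) 1).foldl _
        ((PySem.List.pyRange (a + 1) size 1).foldl _ t, a + 1 + 1)).1 = _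
      rw [ih (a + 1) _ (by omega), pvFoldlAdd]
      unfold pvRowSum pvF; ring

-- A as a sum over the two row ranges
theorem pvA_eq (matrix : List (List Int)) (size : Int) :
    get_right_quarter_sum matrix size
    = ((PySem.List.pyRange 1 (PySem.Int.floordiv size 2 + PySem.Int.mod size 2) 1).map
        (fun row => pvRowSum matrix size row (size - row))).sum
    + ((PySem.List.pyRange (PySem.Int.floordiv size 2 + PySem.Int.mod size 2) (size - 1) 1).map
        (fun row => pvRowSum matrix size row (row + 1))).sum := by
  obtain ⟨hfd, hm0, hm2⟩ := pvMidFacts size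
  unfold get_right_quarter_sum
  set mid := PySem.Int.floordiv size 2 + PySem.Int.mod size 2 with hmid
  by_cases hlt : mid < size - 1
  · have hmid2 : 1 < mid := by omega
    have hpair :
        ((PySem.List.pyRange 1 mid 1).foldl
          (fun (st : Int × Int) row =>
            ((PySem.List.pyRange (size - row) size 1).foldl
              (fun t col => t + PySem.List.pyGetD (PySem.List.pyGetD matrix row []) col 0) st.1,
             row + 2)) (0, 0))
        = (((PySem.List.pyRange 1 mid 1).map
            (fun row => pvRowSum matrix size row (size - row))).sum, mid + 1) := by
      apply Prod.ext
      · rw [pvPhase1]; simp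
      · exact pvPhase1Start matrix size (mid - 1).toNat 1 mid 0 0 rfl hmid2
    rw [hpair]
    exact pvPhase2 matrix size (size - 1 - mid).toNat mid _ rfl
  · rw [PySem.List.pyRange_one_eq_nil (show size - 1 ≤ mid by omega)]
    rw [List.foldl_nil, List.map_nil, List.sum_nil, add_zero, pvPhase1]
    simp

-- A over the merged row range 1..size-2 with the per-row bound max(row, size-1-row)+1
theorem pvA_mid (matrix : List (List Int)) (size : Int) :
    get_right_quarter_sum matrix size
    = ((PySem.List.pyRange 1 (size - 1) 1).map
        (fun i => pvRowSum matrix size i (max i (size - 1 - i) + 1))).sum := by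
  obtain ⟨hfd, hm0, hm2⟩ := pvMidFacts size
  rw [pvA_eq]
  set mid := PySem.Int.floordiv size 2 + PySem.Int.mod size 2 with hmid
  by_cases hs : size ≤ 1
  · rw [PySem.List.pyRange_one_eq_nil (show mid ≤ 1 by omega),
        PySem.List.pyRange_one_eq_nil (show size - 1 ≤ mid by omega),
        PySem.List.pyRange_one_eq_nil (show size - 1 ≤ 1 by omega)]
    simp
  · rw [PySem.List.pyRange_one_append 1 mid (size - 1) (by omega) (by omega),
        List.map_append, List.sum_append]
    congr 1
    · apply congrArg
      apply List.map_congr_left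
      intro x hx
      obtain ⟨hx1, hx2⟩ := PySem.List.mem_pyRange_one.mp hx
      rw [show max x (size - 1 - x) + 1 = size - x by omega]
    · apply congrArg
      apply List.map_congr_left
      intro x hx
      obtain ⟨hx1, hx2⟩ := PySem.List.mem_pyRange_one.mp hx
      rw [show max x (size - 1 - x) + 1 = x + 1 by omega]

-- the merged form, extended to rows 0..size-1 (row 0 and row size-1 contribute nothing)
theorem pvA_full (matrix : List (List Int)) (size : Int) :
    get_right_quarter_sum matrix size
    = ((PySem.List.pyRange 0 size 1).map
        (fun i => pvRowSum matrix size i (max i (size - 1 - i) + 1))).sum := by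
  rw [pvA_mid]
  by_cases h0 : size ≤ 0
  · rw [PySem.List.pyRange_one_eq_nil (show size ≤ 0 by omega),
        PySem.List.pyRange_one_eq_nil (show size - 1 ≤ 1 by omega)]
  · by_cases h1 : size = 1
    · subst h1
      rw [show PySem.List.pyRange 0 1 1 = [0] from by decide,
          PySem.List.pyRange_one_eq_nil (show (1:Int) - 1 ≤ 1 by omega)]
      rw [List.map_singleton, List.sum_singleton, List.map_nil, List.sum_nil]
      rw [show max (0:Int) (1 - 1 - 0) + 1 = 1 by omega]
      exact (pvRowSum_empty matrix 1 0 1 (by omega)).symm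
    · have hs2 : 2 ≤ size := by omega
      rw [PySem.List.pyRange_one_append 0 1 size (by omega) (by omega),
          PySem.List.pyRange_one_append 1 (size - 1) size (by omega) (by omega)]
      have hlast : PySem.List.pyRange (size - 1) size 1 = [size - 1] := by
        have h := PySem.List.pyRange_one_singleton (size - 1)
        rwa [show size - 1 + 1 = size by ring] at h
      rw [hlast, show PySem.List.pyRange 0 1 1 = [0] from by decide]
      rw [List.map_append, List.sum_append, List.map_append, List.sum_append,
          List.map_singleton, List.sum_singleton, List.map_singleton, List.sum_singleton]
      rw [show max (0:Int) (size - 1 - 0) + 1 = size by omega,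
          show max (size - 1) (size - 1 - (size - 1)) + 1 = size by omega]
      rw [pvRowSum_empty matrix size 0 size (by omega),
          pvRowSum_empty matrix size (size - 1) size (by omega)]
      ring

-- a sub-range sum written as a full-range sum with a guard
theorem pvSumGuard (a b c : Int) (g : Int → Int) (ha : 0 ≤ a) (hbc : b ≤ c) :
    ((PySem.List.pyRange a b 1).map g).sum
    = ((PySem.List.pyRange 0 c 1).map (fun x => if a ≤ x ∧ x < b then g x else 0)).sum := by
  by_cases hab : b ≤ a
  · rw [PySem.List.pyRange_one_eq_nil hab, List.map_nil, List.sum_nil]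
    symm
    apply List.sum_eq_zero
    intro y hy
    simp only [List.mem_map] at hy
    obtain ⟨x, hx, hxy⟩ := hy
    obtain ⟨hx1, hx2⟩ := PySem.List.mem_pyRange_one.mp hx
    rw [if_neg (by omega)] at hxy
    omega
  · rw [PySem.List.pyRange_one_append 0 a c (by omega) (by omega),
        PySem.List.pyRange_one_append a b c (by omega) (by omega),
        List.map_append, List.sum_append, List.map_append, List.sum_append]
    have hz1 : ((PySem.List.pyRange 0 a 1).map (fun x => if a ≤ x ∧ x < b then g x else 0)).sum = 0 := by
      apply List.sum_eq_zero
      intro y hy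
      simp only [List.mem_map] at hy
      obtain ⟨x, hx, hxy⟩ := hy
      obtain ⟨hx1, hx2⟩ := PySem.List.mem_pyRange_one.mp hx
      rw [if_neg (by omega)] at hxy; omega
    have hz2 : ((PySem.List.pyRange b c 1).map (fun x => if a ≤ x ∧ x < b then g x else 0)).sum = 0 := by
      apply List.sum_eq_zero
      intro y hy
      simp only [List.mem_map] at hy
      obtain ⟨x, hx, hxy⟩ := hy
      obtain ⟨hx1, hx2⟩ := PySem.List.mem_pyRange_one.mp hx
      rw [if_neg (by omega)] at hxy; omega
    have hmid : (PySem.List.pyRange a b 1).map (fun x => if a ≤ x ∧ x < b then g x else 0)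
        = (PySem.List.pyRange a b 1).map g := by
      apply List.map_congr_left
      intro x hx
      obtain ⟨hx1, hx2⟩ := PySem.List.mem_pyRange_one.mp hx
      rw [if_pos (by omega)]
    rw [hz1, hz2, hmid]
    ring

-- commuting a double list sum
theorem pvSumComm (l1 l2 : List Int) (F : Int → Int → Int) :
    (l1.map (fun x => ((l2.map (fun y => F x y)).sum))).sum
    = (l2.map (fun y => ((l1.map (fun x => F x y)).sum))).sum := by
  induction l1 with
  | nil => simp
  | cons x xs ih =>
      rw [List.map_cons, List.sum_cons, ih]
      rw [show (fun y => ((x :: xs).map (fun x => F x y)).sum)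
            = (fun y => F x y + ((xs.map (fun x => F x y)).sum)) from by
          funext y; rw [List.map_cons, List.sum_cons]]
      rw [PySem.List.sum_map_add_int]

-- B's outer loop accumulated as a sum of inner column sums
theorem pvBFold (matrix : List (List Int)) (size : Int) (l : List Int) (t : Int) :
    l.foldl
      (fun total col =>
        (PySem.List.pyRange (size - col) col 1).foldl
          (fun t row => t + PySem.List.pyGetD (PySem.List.pyGetD matrix row []) col 0) total) t
    = t + (l.map (fun col => ((PySem.List.pyRange (size - col) col 1).map
        (fun row => pvF matrix row col)).sum)).sum := by
  induction l generalizing t with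
  | nil => simp
  | cons x xs ih =>
      rw [List.foldl_cons, List.map_cons, List.sum_cons, ih, pvFoldlAdd]
      unfold pvF; ring

-- B as a column-major double sum
theorem pvB_eq (matrix : List (List Int)) (size : Int) :
    get_right_quarter_sum_alt matrix size
    = ((PySem.List.pyRange 0 size 1).map
        (fun col => ((PySem.List.pyRange (size - col) col 1).map
          (fun row => pvF matrix row col)).sum)).sum := by
  unfold get_right_quarter_sum_alt
  rw [pvBFold, zero_add]

-- ===== VERDICT (by name: the statement is the Claim_ definition above) =====
theorem get_right_quarter_sum_spec : Claim_equal_get_right_quarter_sum := by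
  intro matrix size _ _
  unfold Spec_get_right_quarter_sum
  rw [pvA_full, pvB_eq]
  -- guard both inner sums over the full range 0..size-1, then commute
  have hA : ((PySem.List.pyRange 0 size 1).map
      (fun i => pvRowSum matrix size i (max i (size - 1 - i) + 1))).sum
      = ((PySem.List.pyRange 0 size 1).map (fun i =>
          ((PySem.List.pyRange 0 size 1).map (fun col =>
            if max i (size - 1 - i) + 1 ≤ col ∧ col < size then pvF matrix i col else 0)).sum)).sum := by
    apply congrArg
    apply List.map_congr_left
    intro i hi
    obtain ⟨hi1, hi2⟩ := PySem.List.mem_pyRange_one.mp hi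
    unfold pvRowSum
    exact pvSumGuard (max i (size - 1 - i) + 1) size size _ (by omega) (by omega)
  have hB : ((PySem.List.pyRange 0 size 1).map
      (fun col => ((PySem.List.pyRange (size - col) col 1).map
        (fun row => pvF matrix row col)).sum)).sum
      = ((PySem.List.pyRange 0 size 1).map (fun col =>
          ((PySem.List.pyRange 0 size 1).map (fun row =>
            if size - col ≤ row ∧ row < col then pvF matrix row col else 0)).sum)).sum := by
    apply congrArg
    apply List.map_congr_left
    intro col hc
    obtain ⟨hc1, hc2⟩ := PySem.List.mem_pyRange_one.mp hc
    exact pvSumGuard (size - col) col size _ (by omega) (by omega)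
  rw [hA, hB]
  rw [pvSumComm (PySem.List.pyRange 0 size 1) (PySem.List.pyRange 0 size 1)
      (fun col row => if size - col ≤ row ∧ row < col then pvF matrix row col else 0)]
  apply congrArg
  apply List.map_congr_left
  intro i hi
  obtain ⟨hi1, hi2⟩ := PySem.List.mem_pyRange_one.mp hi
  apply congrArg
  apply List.map_congr_left
  intro col hc
  obtain ⟨hc1, hc2⟩ := PySem.List.mem_pyRange_one.mp hc
  by_cases h : max i (size - 1 - i) + 1 ≤ col ∧ col < size
  · rw [if_pos h, if_pos (by omega)]
  · rw [if_neg h, if_neg (by omega)]
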